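-- pv_equiv track=rewrite | github.com/MIJI-H/CodingTest | 프로그래머스/2/70129. 이진 변환 반복하기/이진 변환 반복하기.py | solution
-- ===== SOURCE A (Python) =====
-- def solution(s):
--     count = 0
--     zero_removed = 0
--
--     while s != '1':
--         zero_count = s.count('0')
--         zero_removed += zero_count
--         s = s.replace('0', '')
--         s = bin(len(s))[2:]
--         count += 1
--     return [count, zero_removed]
-- ===== SOURCE B (Python) =====
-- def solution(s):
--     # build the whole trajectory of survivor counts first, then aggregate it
--     if s == '1':
--         return [0, 0]
--
--     def chain(m):
--         # successive counts of surviving (non-'0') characters, down to 1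
--         return [1] if m == 1 else [m] + chain(bin(m).count('1'))
--
--     traj = chain(len(s) - s.count('0'))
--     return [len(traj),
--             len(s) + sum(t.bit_length() for t in traj[:-1]) - sum(traj)]
-- ===== Notes on version B (the rewrite author's own statement) =====
-- stated objective: alternative
-- what changed: B first materialises the whole trajectory of survivor counts as a list via a recursive chain function, then derives both answers in aggregate passes (len of the list and two sums), instead of A's single destructive while-loop that rewrites a shrinking binary string with running accumulators.
-- outside the precondition, e.g. on solution('0'): A does not finish within the time limit, B raises RecursionError; on solution(''): A does not finish within the time limit, B raises RecursionError
import Mathlib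
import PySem

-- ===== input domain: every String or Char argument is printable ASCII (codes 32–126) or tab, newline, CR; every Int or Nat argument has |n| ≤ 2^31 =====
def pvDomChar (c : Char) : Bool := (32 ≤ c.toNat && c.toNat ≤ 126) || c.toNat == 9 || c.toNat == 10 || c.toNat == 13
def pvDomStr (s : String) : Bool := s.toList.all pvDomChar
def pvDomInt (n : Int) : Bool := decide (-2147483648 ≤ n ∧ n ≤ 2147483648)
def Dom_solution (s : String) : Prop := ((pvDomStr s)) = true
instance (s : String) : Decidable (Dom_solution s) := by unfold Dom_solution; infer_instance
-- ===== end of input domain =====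

-- B builds the whole trajectory of survivor counts as a list (recursively), then aggregates it with len and sums,
-- instead of A's destructive while-loop over a shrinking string; equal on all inputs where A terminates.

-- ===== PORT A =====
-- while s != '1': zero_count = s.count('0'); zero_removed += zero_count; s = s.replace('0',''); s = bin(len(s))[2:]; count += 1
-- Fuel |s|+2 is an upper bound on the iterations A performs on any input admitted by Pre_ (the loop shrinks the ones-count each round);
-- on inputs outside Pre_ A loops forever.  bin(len)[2:] is PySem.Int.toBinChars0b sliced from 2 (exact: len ≥ 0).
def solutionLoop : Nat → List Char → Int → Int → List Int
  | 0, _, count, zr => [count, zr]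
  | fuel+1, cs, count, zr =>
    if cs = ['1'] then [count, zr]
    else
      let zc : Int := (PySem.Chars.count cs ['0'] : Int)
      let cs1 := PySem.Chars.replace cs ['0'] []
      let cs2 := PySem.List.slice (PySem.Int.toBinChars0b (PySem.Chars.len cs1)) (some 2) none
      solutionLoop fuel cs2 (count + 1) (zr + zc)

def solution (s : String) : List Int := solutionLoop (s.toList.length + 2) s.toList 0 0

-- ===== PORT B =====
-- chain(m): the trajectory of survivor counts down to 1, built recursively; fuel m+1 suffices since
-- bin(m).count('1') < m for m ≥ 2 (on m = 0, outside Pre_, Python recurses forever).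
-- bin(m).count('1') is PySem.Int.bitCount m (exact: m ≥ 0 throughout, a character count).
def chainB : Nat → Int → List Int
  | 0, _ => []
  | f+1, m => if m = 1 then [1] else m :: chainB f ((PySem.Int.bitCount m : Int))

def solution_alt (s : String) : List Int :=
  let cs := s.toList
  if cs = ['1'] then [0, 0]
  else
    let surv : Int := (cs.length : Int) - (PySem.Chars.count cs ['0'] : Int)
    let traj := chainB (surv.toNat + 1) surv
    [(traj.length : Int),
     (cs.length : Int) + (traj.dropLast.map (fun t => ((PySem.Int.bitLength t : Nat) : Int))).sum - traj.sum]

-- ===== PRECONDITION & SPEC =====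
-- Pre_ excludes exactly the strings all of whose characters are '0' (including ""): on those A's while-loop never terminates.
def Pre_solution (s : String) : Prop := 0 < s.toList.countP (fun c => c ≠ '0')
instance (s : String) : Decidable (Pre_solution s) := by unfold Pre_solution; infer_instance
def pvWitness_solution : String := "110010"

def Spec_solution (s : String) (out : List Int) : Prop := out = solution_alt s
instance (s : String) (out : List Int) : Decidable (Spec_solution s out) := by unfold Spec_solution; infer_instance

-- ===== CLAIM (what is proved, stated in full; the proofs are below) =====
def Claim_equal_solution : Prop := ∀ (s : String), Dom_solution s → Pre_solution s → Spec_solution s (solution s)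

-- ===== LEMMAS AND PROOFS =====

-- proof-side popcount on Nat
def pc (m : Nat) : Nat := PySem.Int.bitCount (m : Int)

theorem pc_rec (m : Nat) (hm : 0 < m) : pc m = m % 2 + pc (m / 2) := by
  unfold pc; exact PySem.Int.bitCount_natCast (m := m) hm

theorem pc_pos (m : Nat) (hm : 0 < m) : 0 < pc m := by
  induction m using Nat.strong_induction_on with
  | _ m ih =>
    rw [pc_rec m hm]
    by_cases h0 : m % 2 = 1
    · omega
    · have := ih (m / 2) (by omega) (by omega)
      omega

theorem pc_one : pc 1 = 1 := by decide

theorem pc_lt (m : Nat) (hm : 2 ≤ m) : pc m < m := by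
  induction m using Nat.strong_induction_on with
  | _ m ih =>
    rw [pc_rec m (by omega)]
    by_cases h2 : 2 ≤ m / 2
    · have := ih (m / 2) (by omega) h2
      omega
    · have h1 : m / 2 = 1 := by omega
      rw [h1, pc_one]
      omega

-- proof-side trajectory (well-founded on m, no fuel)
def chainN (m : Nat) : List Int :=
  if _h : m ≤ 1 then [1] else (m : Int) :: chainN (pc m)
decreasing_by exact pc_lt m (by omega)

theorem chainN_ne_nil (m : Nat) : chainN m ≠ [] := by
  unfold chainN; split <;> simp

theorem chainN_sum (m : Nat) (hm : 1 ≤ m) :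
    (chainN m).sum = (m : Int) + (chainN m).tail.sum := by
  rw [chainN]
  by_cases h : m ≤ 1
  · have : m = 1 := by omega
    subst this; simp
  · rw [dif_neg h]; simp

theorem chainB_eq_chainN : ∀ (fuel m : Nat), 1 ≤ m → m ≤ fuel →
    chainB fuel (m : Int) = chainN m := by
  intro fuel
  induction fuel with
  | zero => intro m h1 h2; omega
  | succ f ih =>
    intro m h1 h2
    rw [chainB]
    by_cases hm1 : m = 1
    · subst hm1
      rw [if_pos (by norm_num), chainN]
      rfl
    · rw [if_neg (by exact_mod_cast hm1)]
      have h2m : 2 ≤ m := by omega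
      have hlt : pc m < m := pc_lt m h2m
      have hpc : PySem.Int.bitCount ((m : Nat) : Int) = pc m := rfl
      rw [hpc, ih (pc m) (pc_pos m (by omega)) (by omega)]
      conv_rhs => rw [chainN, dif_neg (by omega)]

-- proof-side characterisation of the binary numeral of n
def binlist (n : Nat) : List Char :=
  if _h : n < 2 then [Nat.digitChar n] else binlist (n / 2) ++ [Nat.digitChar (n % 2)]
decreasing_by exact Nat.div_lt_self (by omega) (by omega)

theorem binlist_ne_nil (n : Nat) : binlist n ≠ [] := by
  unfold binlist; split <;> simp

theorem toDigitsCore_eq_binlist : ∀ (f n : Nat) (ds : List Char), 0 < n → n < f →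
    Nat.toDigitsCore 2 f n ds = binlist n ++ ds := by
  intro f
  induction f with
  | zero => omega
  | succ f ih =>
    intro n ds hn hf
    rw [Nat.toDigitsCore]
    by_cases h2 : n / 2 = 0
    · have h1 : n = 1 := by omega
      subst h1
      rw [if_pos h2]
      rw [binlist]
      rfl
    · rw [if_neg h2, ih (n / 2) _ (by omega) (by omega)]
      conv_rhs => rw [binlist]
      rw [dif_neg (by omega)]
      simp

theorem toDigits_eq_binlist (n : Nat) (hn : 0 < n) : Nat.toDigits 2 n = binlist n := by
  rw [Nat.toDigits, toDigitsCore_eq_binlist (n+1) n [] hn (by omega)]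
  simp

theorem binlist_mem (n : Nat) (hn : 0 < n) : ∀ c ∈ binlist n, c = '0' ∨ c = '1' := by
  induction n using Nat.strong_induction_on with
  | _ n ih =>
    intro c hc
    rw [binlist] at hc
    by_cases h : n < 2
    · rw [dif_pos h] at hc
      interval_cases n <;> simp_all [Nat.digitChar]
    · rw [dif_neg h] at hc
      rcases List.mem_append.1 hc with h1 | h1
      · exact ih (n / 2) (by omega) (by omega) c h1
      · have : n % 2 = 0 ∨ n % 2 = 1 := by omega
        rcases this with h0 | h0 <;> simp_all [Nat.digitChar]

theorem binlist_count_one (n : Nat) (hn : 0 < n) :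
    (binlist n).count '1' = pc n := by
  induction n using Nat.strong_induction_on with
  | _ n ih =>
    rw [binlist]
    by_cases h : n < 2
    · interval_cases n
      decide
    · rw [dif_neg h, pc_rec n (by omega), List.count_append,
        ih (n / 2) (by omega) (by omega)]
      have : n % 2 = 0 ∨ n % 2 = 1 := by omega
      rcases this with h0 | h0 <;> simp [h0, Nat.digitChar] <;> omega

theorem binlist_length (n : Nat) (hn : 0 < n) :
    (binlist n).length = PySem.Int.bitLength (n : Int) := by
  induction n using Nat.strong_induction_on with
  | _ n ih =>
    rw [binlist]
    by_cases h : n < 2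
    · interval_cases n
      decide
    · rw [dif_neg h, PySem.Int.bitLength_natCast (m := n) (by omega), List.length_append,
        ih (n / 2) (by omega) (by omega)]
      simp

theorem binlist_eq_one_iff (n : Nat) (hn : 0 < n) : binlist n = ['1'] ↔ n = 1 := by
  constructor
  · intro h
    by_contra hne
    have h2 : ¬ n < 2 := by omega
    rw [binlist, dif_neg h2] at h
    have hnil : binlist (n / 2) ≠ [] := binlist_ne_nil (n / 2)
    have hl := congrArg List.length h
    simp at hl
    exact hnil hl
  · intro h; subst h; rw [binlist]; rfl

-- counting a one-character needle is counting that character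
theorem count_go_single (c0 : Char) : ∀ (f : Nat) (l : List Char) (acc : Nat), l.length ≤ f →
    PySem.Chars.count.go [c0] f l acc = acc + l.count c0 := by
  intro f
  induction f with
  | zero => intro l acc h; cases l <;> simp_all [PySem.Chars.count.go]
  | succ f ih =>
    intro l acc h
    cases l with
    | nil => simp [PySem.Chars.count.go]
    | cons x t =>
      rw [PySem.Chars.count.go]
      by_cases hx : x = c0
      · subst hx
        rw [if_pos (by simp [List.isPrefixOf])]
        simp only [List.length_cons] at h
        simp only [List.length_singleton, List.drop_succ_cons, List.drop_zero]
        rw [ih t (acc + 1) (by omega)]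
        simp [List.count_cons]
        omega
      · rw [if_neg (by simp [List.isPrefixOf]; exact fun h => absurd h.symm hx)]
        simp only [List.length_cons] at h
        rw [ih t acc (by omega)]
        simp [List.count_cons, hx]

theorem chars_count_single (c0 : Char) (l : List Char) :
    PySem.Chars.count l [c0] = l.count c0 := by
  rw [PySem.Chars.count]
  simp [count_go_single c0 l.length l 0 le_rfl]

-- replacing a one-character needle by "" is filtering it out
theorem replace_go_single (c0 : Char) : ∀ (f : Nat) (l acc : List Char), l.length ≤ f →
    PySem.Chars.replace.go [c0] [] f l acc = acc.reverse ++ l.filter (fun c => c ≠ c0) := by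
  intro f
  induction f with
  | zero => intro l acc h; cases l <;> simp_all [PySem.Chars.replace.go]
  | succ f ih =>
    intro l acc h
    cases l with
    | nil => simp [PySem.Chars.replace.go]
    | cons x t =>
      rw [PySem.Chars.replace.go]
      by_cases hx : x = c0
      · subst hx
        rw [if_pos (by simp [List.isPrefixOf])]
        simp only [List.length_cons] at h
        simp only [List.length_singleton, List.drop_succ_cons, List.drop_zero, List.reverse_nil,
          List.nil_append]
        rw [ih t acc (by omega)]
        simp [List.filter_cons]
      · rw [if_neg (by simp [List.isPrefixOf]; exact fun h => absurd h.symm hx)]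
        simp only [List.length_cons] at h
        rw [ih t (x :: acc) (by omega)]
        simp [List.filter_cons, hx]

theorem chars_replace_single (c0 : Char) (l : List Char) :
    PySem.Chars.replace l [c0] [] = l.filter (fun c => c ≠ c0) := by
  rw [PySem.Chars.replace]
  simp [replace_go_single c0 l.length l [] le_rfl]

-- on a 0/1 string, the non-'0' filter keeps exactly the '1's
theorem filter_length_eq_count (l : List Char) (h : ∀ c ∈ l, c = '0' ∨ c = '1') :
    (l.filter (fun c => c ≠ '0')).length = l.count '1' := by
  induction l with
  | nil => simp
  | cons x t ih =>
    have hx := h x (by simp)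
    have ht := fun c hc => h c (List.mem_cons_of_mem x hc)
    rcases hx with h0 | h0 <;> subst h0 <;>
      simp_all [List.filter_cons, List.count_cons]

theorem count_zero_eq (l : List Char) (h : ∀ c ∈ l, c = '0' ∨ c = '1') :
    l.count '0' + l.count '1' = l.length := by
  induction l with
  | nil => simp
  | cons x t ih =>
    have hx := h x (by simp)
    have ht := fun c hc => h c (List.mem_cons_of_mem x hc)
    rcases hx with h0 | h0 <;> subst h0 <;> simp [List.count_cons, ← ih ht] <;> omega

-- the binary slice step: bin(m)[2:] for m ≥ 0
theorem slice_toBinChars0b (m : Nat) :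
    PySem.List.slice (PySem.Int.toBinChars0b (m : Int)) (some 2) none = Nat.toDigits 2 m := by
  rw [PySem.Int.toBinChars0b, if_neg (by omega)]
  simp [PySem.List.slice_from, Int.toNat_natCast]

-- core correspondence: A's loop on bin(m) equals the trajectory aggregates of chainN m
theorem loop_chain : ∀ (m : Nat), 1 ≤ m → ∀ (fuel : Nat) (c z : Int), m ≤ fuel →
    solutionLoop fuel (binlist m) c z =
    [c + ((chainN m).length : Int) - 1,
     z + ((chainN m).dropLast.map (fun t => ((PySem.Int.bitLength t : Nat) : Int))).sum
       - (chainN m).tail.sum] := by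
  intro m
  induction m using Nat.strong_induction_on with
  | _ m ih =>
    intro hm fuel c z hf
    by_cases h1 : m = 1
    · subst h1
      have hch : chainN 1 = [1] := by rw [chainN]; rfl
      have hbl : binlist 1 = ['1'] := by rw [binlist]; rfl
      rw [hch, hbl]
      match fuel with
      | 0 => simp [solutionLoop]
      | f+1 =>
        rw [solutionLoop, if_pos rfl]
        simp
    · have hm2 : 2 ≤ m := by omega
      match fuel, hf with
      | 0, hf => omega
      | f+1, hf =>
        rw [solutionLoop, if_neg (by rw [binlist_eq_one_iff m (by omega)]; exact h1)]
        have hmem := binlist_mem m (by omega)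
        have hcnt1 : (binlist m).count '1' = pc m := binlist_count_one m (by omega)
        have hlen : (binlist m).length = PySem.Int.bitLength (m : Int) := binlist_length m (by omega)
        have hflt : (PySem.Chars.replace (binlist m) ['0'] []).length = pc m := by
          rw [chars_replace_single, filter_length_eq_count _ hmem, hcnt1]
        have hzc : (PySem.Chars.count (binlist m) ['0'] : Int)
            = (PySem.Int.bitLength (m : Int) : Int) - (pc m : Int) := by
          rw [chars_count_single]
          have := count_zero_eq (binlist m) hmem
          rw [hcnt1, hlen] at this
          omega
        have hbc : 0 < pc m := pc_pos m (by omega)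
        simp only [PySem.Chars.len, hflt, slice_toBinChars0b, toDigits_eq_binlist _ hbc]
        rw [hzc, ih (pc m) (pc_lt m hm2) hbc f (c + 1) _ (by have := pc_lt m hm2; omega)]
        have hch : chainN m = (m : Int) :: chainN (pc m) := by
          rw [chainN, dif_neg (by omega)]
        obtain ⟨b, l, hbl⟩ := List.exists_cons_of_ne_nil (chainN_ne_nil (pc m))
        have hsum := chainN_sum (pc m) hbc
        rw [hch, hbl]
        rw [hbl] at hsum
        simp only [List.length_cons, List.tail_cons, List.dropLast_cons₂, List.map_cons,
          List.sum_cons, List.cons.injEq, and_true] at *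
        refine ⟨by push_cast; ring, ?_⟩
        linarith [hsum]

-- ===== VERDICT (by name: the statement is the Claim_ definition above) =====
theorem solution_spec : Claim_equal_solution := by
  intro s _ hpre
  unfold Spec_solution solution solution_alt
  set cs := s.toList with hcs
  by_cases h1 : cs = ['1']
  · rw [if_pos h1, h1]
    rw [solutionLoop]
    rfl
  · rw [if_neg h1]
    set ones : Nat := cs.countP (fun c => c ≠ '0') with hones_def
    have hones : 0 < ones := hpre
    have hcount : cs.count '0' + ones = cs.length := by
      have h0 : cs.count '0' = cs.countP (fun c => c = '0') := by
        simp [List.count]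
        rfl
      rw [h0, hones_def]
      simpa using (List.length_eq_countP_add_countP (fun c => c = '0') (l := cs)).symm
    have hsurv : (cs.length : Int) - (PySem.Chars.count cs ['0'] : Int) = (ones : Int) := by
      rw [chars_count_single]
      push_cast
      omega
    -- A side: one step, then the loop on binlist ones
    rw [solutionLoop, if_neg h1]
    have hflt : (PySem.Chars.replace cs ['0'] []).length = ones := by
      rw [chars_replace_single, hones_def, List.countP_eq_length_filter]
    simp only [PySem.Chars.len, hflt, slice_toBinChars0b, toDigits_eq_binlist _ hones, zero_add]
    rw [loop_chain ones hones (cs.length + 1) 1 _ (by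
      have : ones ≤ cs.length := by
        rw [hones_def]; exact List.countP_le_length
      omega)]
    -- B side: the trajectory is chainN ones
    have htraj : chainB (((cs.length : Int) - (PySem.Chars.count cs ['0'] : Int)).toNat + 1)
        ((cs.length : Int) - (PySem.Chars.count cs ['0'] : Int)) = chainN ones := by
      rw [hsurv]
      have : ((ones : Int)).toNat = ones := Int.toNat_natCast ones
      rw [this]
      exact chainB_eq_chainN (ones + 1) ones hones (by omega)
    simp only [htraj]
    have hsum := chainN_sum ones hones
    have hzc : (PySem.Chars.count cs ['0'] : Int) = (cs.length : Int) - (ones : Int) := by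
      rw [chars_count_single]; push_cast; omega
    rw [hzc]
    simp only [List.cons.injEq, and_true]
    refine ⟨by ring, by linarith [hsum]⟩
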